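-- pv_equiv track=rewrite | github.com/Thyge1232/AktieScreener | core/data/data_fetcher.py | _determine_strategy_from_metrics
-- ===== SOURCE A (Python) =====
-- from typing import Dict, Any, List, Optional
--
-- def _determine_strategy_from_metrics(metrics: List[str]) -> str:
--     """Bestemmer hvilken strategitype der er nødvendig baseret på metrikkerne"""
--     multibagger_metrics = [
--         "revenue_growth", "eps_growth", "gross_margin", "peg_ratio",
--         "price_above_sma50", "rsi", "volume_surge"
--     ]
--
--     value_metrics = [
--         "pe_ratio", "pb_ratio", "ev_ebitda", "dividend_yield",
--         "current_ratio", "roe", "positive_eps_years"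
--     ]
--
--     deep_value_metrics = [
--         "cash_to_market_cap", "price_to_nca", "price_to_tangible_book",
--         "recent_eps_growth", "news_sentiment"
--     ]
--
--     # Tæl antallet af metrikker for hver strategi
--     counts = {
--         "multibagger": sum(1 for m in metrics if m in multibagger_metrics),
--         "value": sum(1 for m in metrics if m in value_metrics),
--         "deep_value": sum(1 for m in metrics if m in deep_value_metrics)
--     }
--
--     # Returner strategien med flest matchende metrikker
--     return max(counts, key=counts.get)
-- ===== SOURCE B (Python) =====
-- def _determine_strategy_from_metrics(metrics):
--     """Single pass with three counters instead of three scans + dict + max."""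
--     multibagger_metrics = {
--         "revenue_growth", "eps_growth", "gross_margin", "peg_ratio",
--         "price_above_sma50", "rsi", "volume_surge"
--     }
--     value_metrics = {
--         "pe_ratio", "pb_ratio", "ev_ebitda", "dividend_yield",
--         "current_ratio", "roe", "positive_eps_years"
--     }
--     deep_value_metrics = {
--         "cash_to_market_cap", "price_to_nca", "price_to_tangible_book",
--         "recent_eps_growth", "news_sentiment"
--     }
--     mb = v = dv = 0
--     for m in metrics:
--         if m in multibagger_metrics:
--             mb += 1
--         elif m in value_metrics:
--             v += 1
--         elif m in deep_value_metrics: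
--             dv += 1
--     # first-maximal tie-break in the order multibagger, value, deep_value (as max() does)
--     if v > mb:
--         return "deep_value" if dv > v else "value"
--     else:
--         return "deep_value" if dv > mb else "multibagger"
-- ===== Notes on version B (the rewrite author's own statement) =====
-- stated objective: faster
-- what changed: Replaces A's three separate generator scans plus a dict and max(key=...) with a single pass over metrics maintaining three integer counters (set membership; the categories are disjoint so elif is exact) and an explicit first-maximal comparison chain.
import Mathlib
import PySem

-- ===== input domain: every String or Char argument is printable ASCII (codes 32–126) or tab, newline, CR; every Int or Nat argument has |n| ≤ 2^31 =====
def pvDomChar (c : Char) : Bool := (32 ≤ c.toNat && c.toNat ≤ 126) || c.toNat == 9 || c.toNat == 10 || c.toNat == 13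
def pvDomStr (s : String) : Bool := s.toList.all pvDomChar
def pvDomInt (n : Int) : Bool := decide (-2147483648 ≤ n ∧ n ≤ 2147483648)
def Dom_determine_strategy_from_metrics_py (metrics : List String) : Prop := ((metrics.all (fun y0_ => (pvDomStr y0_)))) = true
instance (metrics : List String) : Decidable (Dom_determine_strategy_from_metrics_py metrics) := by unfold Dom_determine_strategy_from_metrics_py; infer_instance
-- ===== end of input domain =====

-- B replaces A's three generator scans + dict + max(key=…) by one pass with three counters
-- and an explicit first-maximal comparison chain (objective: alternative decomposition).

-- ===== PORT A =====
-- A's three literal metric lists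
def pvMB : List String :=
  ["revenue_growth", "eps_growth", "gross_margin", "peg_ratio",
   "price_above_sma50", "rsi", "volume_surge"]
def pvV : List String :=
  ["pe_ratio", "pb_ratio", "ev_ebitda", "dividend_yield",
   "current_ratio", "roe", "positive_eps_years"]
def pvDV : List String :=
  ["cash_to_market_cap", "price_to_nca", "price_to_tangible_book",
   "recent_eps_growth", "news_sentiment"]

-- sum(1 for m in metrics if m in L)
def pvSum1 (metrics L : List String) : Int :=
  ((metrics.filter (fun m => decide (m ∈ L))).map (fun _ => (1 : Int))).sum

def determine_strategy_from_metrics_py (metrics : List String) : String :=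
  let counts : PySem.Dict String Int :=
    ((PySem.Dict.empty.insert "multibagger" (pvSum1 metrics pvMB)).insert
        "value" (pvSum1 metrics pvV)).insert "deep_value" (pvSum1 metrics pvDV)
  -- max(counts, key=counts.get); counts always has three keys, so max? is some
  match PySem.List.max? counts.keys (fun k => counts.getD k 0) with
  | some s => s
  | none => ""   -- unreachable: counts.keys has three elements

-- ===== PORT B =====
def pvMBset : PySem.Set String := PySem.Set.ofList
  ["revenue_growth", "eps_growth", "gross_margin", "peg_ratio",
   "price_above_sma50", "rsi", "volume_surge"]
def pvVset : PySem.Set String := PySem.Set.ofList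
  ["pe_ratio", "pb_ratio", "ev_ebitda", "dividend_yield",
   "current_ratio", "roe", "positive_eps_years"]
def pvDVset : PySem.Set String := PySem.Set.ofList
  ["cash_to_market_cap", "price_to_nca", "price_to_tangible_book",
   "recent_eps_growth", "news_sentiment"]

def pvStepB (s : Int × Int × Int) (m : String) : Int × Int × Int :=
  if PySem.Set.contains pvMBset m then (s.1 + 1, s.2.1, s.2.2)
  else if PySem.Set.contains pvVset m then (s.1, s.2.1 + 1, s.2.2)
  else if PySem.Set.contains pvDVset m then (s.1, s.2.1, s.2.2 + 1)
  else s

def determine_strategy_from_metrics_py_alt (metrics : List String) : String :=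
  let st := metrics.foldl pvStepB (0, 0, 0)
  if st.2.1 > st.1 then (if st.2.2 > st.2.1 then "deep_value" else "value")
  else (if st.2.2 > st.1 then "deep_value" else "multibagger")

-- ===== PRECONDITION & SPEC =====
def Spec_determine_strategy_from_metrics_py (metrics : List String) (out : String) : Prop := out = determine_strategy_from_metrics_py_alt metrics
instance (metrics : List String) (out : String) : Decidable (Spec_determine_strategy_from_metrics_py metrics out) := by unfold Spec_determine_strategy_from_metrics_py; infer_instance

-- ===== CLAIM (what is proved, stated in full; the proofs are below) =====
def Claim_equal_determine_strategy_from_metrics_py : Prop := ∀ (metrics : List String), Dom_determine_strategy_from_metrics_py metrics → Spec_determine_strategy_from_metrics_py metrics (determine_strategy_from_metrics_py metrics)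

-- ===== LEMMAS AND PROOFS =====

-- the three categories are pairwise disjoint
lemma pv_disj_mb_v {m : String} (h : m ∈ pvMB) : m ∉ pvV := by
  fin_cases h <;> decide
lemma pv_disj_mb_dv {m : String} (h : m ∈ pvMB) : m ∉ pvDV := by
  fin_cases h <;> decide
lemma pv_disj_v_dv {m : String} (h : m ∈ pvV) : m ∉ pvDV := by
  fin_cases h <;> decide

-- A's 0/1-sum is a countP
lemma pvSum1_eq_countP (metrics L : List String) :
    pvSum1 metrics L = (metrics.countP (fun m => decide (m ∈ L)) : Int) := by
  unfold pvSum1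
  rw [PySem.List.sum_map_const_int, List.countP_eq_length_filter]
  ring

-- B's fold computes the three counts
lemma pvFoldB (metrics : List String) (a b c : Int) :
    metrics.foldl pvStepB (a, b, c) =
      (a + (metrics.countP (fun m => decide (m ∈ pvMB)) : Int),
       b + (metrics.countP (fun m => decide (m ∈ pvV)) : Int),
       c + (metrics.countP (fun m => decide (m ∈ pvDV)) : Int)) := by
  induction metrics generalizing a b c with
  | nil => simp
  | cons m rest ih =>
    have hmb : (m ∈ pvMBset) ↔ (m ∈ pvMB) := by
      simp [pvMBset, pvMB, PySem.Set.mem_ofList]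
    have hv : (m ∈ pvVset) ↔ (m ∈ pvV) := by
      simp [pvVset, pvV, PySem.Set.mem_ofList]
    have hdv : (m ∈ pvDVset) ↔ (m ∈ pvDV) := by
      simp [pvDVset, pvDV, PySem.Set.mem_ofList]
    by_cases h1 : m ∈ pvMB
    · have h2 := pv_disj_mb_v h1
      have h3 := pv_disj_mb_dv h1
      simp [List.foldl_cons, pvStepB, hmb, h1, h2, h3, ih] <;> omega
    · by_cases h2 : m ∈ pvV
      · have h3 := pv_disj_v_dv h2
        simp [List.foldl_cons, pvStepB, hmb, hv, h1, h2, h3, ih] <;> omega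
      · by_cases h3 : m ∈ pvDV
        · simp [List.foldl_cons, pvStepB, hmb, hv, hdv, h1, h2, h3, ih] <;> omega
        · simp [List.foldl_cons, pvStepB, hmb, hv, hdv, h1, h2, h3, ih]

-- ===== VERDICT (by name: the statement is the Claim_ definition above) =====
theorem determine_strategy_from_metrics_py_spec : Claim_equal_determine_strategy_from_metrics_py := by
  intro metrics _
  show determine_strategy_from_metrics_py metrics = determine_strategy_from_metrics_py_alt metrics
  unfold determine_strategy_from_metrics_py determine_strategy_from_metrics_py_alt
  rw [pvFoldB]
  simp only [pvSum1_eq_countP]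
  set c1 := (metrics.countP (fun m => decide (m ∈ pvMB)) : Int)
  set c2 := (metrics.countP (fun m => decide (m ∈ pvV)) : Int)
  set c3 := (metrics.countP (fun m => decide (m ∈ pvDV)) : Int)
  simp only [PySem.Dict.insert, PySem.Dict.empty, PySem.Dict.keys, PySem.Dict.contains,
        PySem.Dict.getD, PySem.Dict.get?, PySem.List.max?]
  by_cases h12 : c1 < c2 <;>
    simp [h12, gt_iff_lt] <;> split_ifs <;> first | rfl | omega
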